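/- GENERATED by mk_final_copies.py from the proof of the farm's unit `decode_residue.4a` (farm:decode_residue.4a.1: Lemmas.lean) as the
   re-elaboration sweep compiled it — do not edit. -/
import Asan.CheckWalk
import Vorbis.Spec.Units.decode_residue_4a
open X86 X86.User Asan Vorbis Vorbis.Spec Vorbis.Spec.DecodeResidue

set_option maxRecDepth 4000
set_option maxHeartbeats 4000000

namespace Vorbis.Spec.decode_residue_4a

/-- What the `while` head (0x10f2a3) leads to in one step of control: DECODE #1 (pass 0), the i-loop's entry (pass ≥ 1), or the
pass latch. -/
def HeadExit (u₀ : State) (g : G) (pass cs pcount : Nat) (v' : State) : Prop :=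
  (pass = 0 ∧ pcount < g.PRD ∧ At10 u₀ g cs pcount v') ∨ (1 ≤ pass ∧ At16 u₀ g pass cs pcount v') ∨ At24 u₀ g pass v'

/-- Where the residue record `r` lies: inside the data space, off the stack region (R2 + `BlkOK` + `BlkFree`). -/
theorem r_where {u₀ : State} {g : G} {v : State} (hent : Entered u₀ g) (hc : Common u₀ g v) :
    0x100000 ≤ g.r ∧ g.r + 32 ≤ 0xC00000 ∧ (g.r + 32 ≤ 0x700000 ∨ 0x800000 ≤ g.r) := by
  have hR : ResidueOK g.Blk v.mem g.f := hc.point.vorbis.residue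
  have hB := hR.R2
  have hin := hc.point.env.ok.inside _ hB
  have hst := hent.pre.free.offStack _ hB
  have hlt := hc.rn_lt hent
  have h1 := hR.R1
  have e := hc.config_at
  unfold stb_vorbis.residue_config_at at e
  simp only [vblock, voff] at hin hst e
  omega




/-- The windows of the own stack frame that segment 4 stores to: everything below the steady stack pointer (return addresses,
the two pushed arguments, the callees' frames), the scratch slots `class_set` `[rbp−0xd8]`, `psz` `[rbp−0xb8]`, `z` `[rbp−0x98]`,
and the two ints `c_inter` `[rbp−0x60]`, `p_inter` `[rbp−0x50]`. None of COMMON's constant slots is inside. -/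
def stackWins (g : G) : List Span :=
  [⟨(g.e.reg .rsp).toNat - 848, (g.e.reg .rsp).toNat - 248⟩,
   ⟨(g.e.reg .rsp).toNat - 224, (g.e.reg .rsp).toNat - 220⟩,
   ⟨(g.e.reg .rsp).toNat - 192, (g.e.reg .rsp).toNat - 188⟩,
   ⟨(g.e.reg .rsp).toNat - 160, (g.e.reg .rsp).toNat - 156⟩,
   ⟨(g.e.reg .rsp).toNat - 104, (g.e.reg .rsp).toNat - 100⟩,
   ⟨(g.e.reg .rsp).toNat - 88, (g.e.reg .rsp).toNat - 84⟩]

/-- A slot of the frame `[RA − 248, RA)` that meets none of the five small windows reads the same after stores inside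
`stackWins`. -/
theorem slot_kept {g : G} {m m' : Mem} (hroom : 0x700000 + 848 ≤ (g.e.reg .rsp).toNat)
    (hs : Mem.SameExcept (stackWins g) m m') (k n : Nat) (hk : k ≤ 248) (hn : n ≤ k)
    (h1 : k ≤ 220 ∨ 224 ≤ k - n) (h2 : k ≤ 188 ∨ 192 ≤ k - n) (h3 : k ≤ 156 ∨ 160 ≤ k - n)
    (h4 : k ≤ 100 ∨ 104 ≤ k - n) (h5 : k ≤ 84 ∨ 88 ≤ k - n) :
    m'.readLE (g.e.reg .rsp - UInt64.ofNat k) n = m.readLE (g.e.reg .rsp - UInt64.ofNat k) n := by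
  have e : (g.e.reg .rsp - UInt64.ofNat k).toNat = (g.e.reg .rsp).toNat - k := by
    have hlt := (g.e.reg .rsp).toNat_lt
    rw [UInt64.toNat_sub_of_le]
    · rw [UInt64.toNat_ofNat']
      have : k % 2 ^ 64 = k := Nat.mod_eq_of_lt (by omega)
      omega
    · rw [UInt64.le_iff_toNat_le, UInt64.toNat_ofNat']
      have : k % 2 ^ 64 = k := Nat.mod_eq_of_lt (by omega)
      omega
  have hlt := (g.e.reg .rsp).toNat_lt
  apply hs.readLE
  · rw [e]
    omega
  · intro w hw
    rw [e]
    simp only [stackWins, List.mem_cons, List.mem_nil_iff, or_false] at hw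
    rcases hw with rfl | rfl | rfl | rfl | rfl | rfl <;> simp only [] <;> omega


/-- Every span of `stackWins` lies inside the stack frame `[RA − 848, RA)`. -/
theorem stackWins_in {g : G} (w : Span) (hw : w ∈ stackWins g) :
    (g.e.reg .rsp).toNat - 848 ≤ w.lo ∧ w.hi ≤ (g.e.reg .rsp).toNat ∧ w.lo ≤ w.hi := by
  simp only [stackWins, List.mem_cons, List.mem_nil_iff, or_false] at hw
  rcases hw with rfl | rfl | rfl | rfl | rfl | rfl <;> simp only [] <;> omega

/-- **COMMON OVER STORES INTO THE OWN STACK FRAME** (`stackWins`): the frame slots read the same (`slot_kept`), nothing the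
invariant reads is on the stack (`BlkFree.offStack`, AR1x), `Bits` and μ by `Reader.reader_of_window`. Also `PathA` (its three
slots) and FILL (the temp block, the record and `classdata` are off the stack). -/
theorem common_stack {u₀ : State} {g : G} {v v' : State} (hent : Entered u₀ g) (hc : Common u₀ g v)
    (hs : Mem.SameExcept (stackWins g) v.mem v'.mem) (hun : ShadowUntouched v.mem v'.mem)
    (rbp : v'.reg .rbp = g.e.reg .rsp - 8) (rsp : v'.reg .rsp = g.e.reg .rsp - 248)
    (code : CodeOK u₀ v'.mem) (inv : abiInv v') :
    Common u₀ g v' ∧ (∀ pass, PathA g pass v → PathA g pass v') ∧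
      (∀ j m, j < g.C → m ≤ g.PRD → Fill v.mem g.f g.r g.TB g.C g.PRD j m → Fill v'.mem g.f g.r g.TB g.C g.PRD j m) := by
  have hroom := hent.room.1
  have htop := hent.room.2
  have eRA : g.RA = (g.e.reg .rsp).toNat := rfl
  rw [eRA] at hroom htop
  have hok := hent.pre.env.ok
  have hoff : ∀ B, g.Blk B → B.base + B.size ≤ 0x700000 ∨ 0x800000 ≤ B.base := hent.pre.free.offStack
  -- every allocated block is kept
  have hall : ∀ B, g.Blk B → B.Kept v.mem v'.mem := by
    intro B hB
    apply Block.Kept.of_sameExcept hs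
    · intro w hw
      have h1 := stackWins_in w hw
      have h2 := hoff B hB
      omega
    · exact hok.no_wrap hB
  -- `*f` is off the stack
  have hob : g.Blk (objBlock g.f) := hent.vorbis.obj
  have hobst := hoff _ hob
  have hobin := hok.inside _ hob
  simp only [vblock, voff] at hobst hobin
  -- one coarse window for the reader's lemma
  have hs1 : Mem.SameExcept [⟨(g.e.reg .rsp).toNat - 848, (g.e.reg .rsp).toNat⟩] v.mem v'.mem := by
    apply hs.mono
    intro w hw a h1 h2
    have h3 := stackWins_in w hw
    exact ⟨_, List.mem_singleton.mpr rfl, by simp only []; omega, by simp only []; omega⟩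
  obtain ⟨hbits, hmu⟩ := Reader.reader_of_window hc.point.vorbis.bits hs1 (by omega)
  -- the footprint
  have hsame : Mem.SameExcept (g.spec.footprint g.e) g.e.mem v'.mem := by
    apply hc.same.step_same hs
    intro w hw a h1 h2
    have h3 := stackWins_in w hw
    refine ⟨_, List.mem_cons_self, ?_, ?_⟩
    · show (g.e.reg .rsp).toNat - 848 ≤ a
      omega
    · show a < (g.e.reg .rsp).toNat
      omega
  -- the arena layer
  have hbusy : ADOBusy g.A' g.others' v'.mem g.f g.sz := by
    apply hc.point.busy.transfer
    apply ObjEq.of_sameExcept hs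
    · intro w hw
      simp only [ADO.wins, List.mem_cons, List.mem_nil_iff, or_false] at hw
      rcases hw with rfl | rfl <;> simp only [] <;> omega
    · intro w hw s hsp
      have h3 := stackWins_in s hsp
      simp only [ADO.wins, List.mem_cons, List.mem_nil_iff, or_false] at hw
      rcases hw with rfl | rfl <;> simp only [] <;> omega
  -- the temp block is off the stack
  have htb := hc.tblock
  have hrange := hc.point.busy.ok.tblock_range htb
  have h1x := hc.point.busy.ok.AR1x
  have har1 := hc.point.busy.ok.AR1
  have hr8 := le_r8 g.TB.size
  have hTBk : g.TB.Kept v.mem v'.mem := by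
    apply Block.Kept.of_sameExcept hs
    · intro w hw
      have h3 := stackWins_in w hw
      omega
    · omega
  have htb' : TempRows v'.mem g.TB g.C g.PRD := by
    apply hc.tb.frame
    apply hTBk.mono
    · exact Nat.le_refl _
    · have hsz := hc.tb.size
      have h3 : g.C * (8 + 8 * g.PRD) = g.C * 8 + g.C * (8 * g.PRD) := Nat.mul_add _ _ _
      simp only []
      omega
  have hk := fun k n hk hn h1 h2 h3 h4 h5 => slot_kept (g := g) hroom hs k n hk hn h1 h2 h3 h4 h5
  have hc' : Common u₀ g v' := by
    apply Common.of_frame hent rbp rsp code inv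
    · exact (congrArg UInt64.ofNat (hk 8 8 (by omega) (by omega) (by omega) (by omega) (by omega) (by omega) (by omega))).trans hc.s_rbp
    · exact (congrArg UInt64.ofNat (hk 16 8 (by omega) (by omega) (by omega) (by omega) (by omega) (by omega) (by omega))).trans hc.s_r15
    · exact (congrArg UInt64.ofNat (hk 24 8 (by omega) (by omega) (by omega) (by omega) (by omega) (by omega) (by omega))).trans hc.s_r14
    · exact (congrArg UInt64.ofNat (hk 32 8 (by omega) (by omega) (by omega) (by omega) (by omega) (by omega) (by omega))).trans hc.s_r13
    · exact (congrArg UInt64.ofNat (hk 40 8 (by omega) (by omega) (by omega) (by omega) (by omega) (by omega) (by omega))).trans hc.s_r12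
    · exact (congrArg UInt64.ofNat (hk 48 8 (by omega) (by omega) (by omega) (by omega) (by omega) (by omega) (by omega))).trans hc.s_rbx
    · exact (congrArg UInt64.ofNat (hk 184 8 (by omega) (by omega) (by omega) (by omega) (by omega) (by omega) (by omega))).trans hc.fr_f
    · exact (congrArg UInt64.ofNat (hk 216 8 (by omega) (by omega) (by omega) (by omega) (by omega) (by omega) (by omega))).trans hc.fr_rb
    · exact (hk 156 4 (by omega) (by omega) (by omega) (by omega) (by omega) (by omega) (by omega)).trans hc.fr_ch
    · exact (hk 196 4 (by omega) (by omega) (by omega) (by omega) (by omega) (by omega) (by omega)).trans hc.fr_prd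
    · exact (hk 200 4 (by omega) (by omega) (by omega) (by omega) (by omega) (by omega) (by omega)).trans hc.fr_w
    · exact (hk 232 4 (by omega) (by omega) (by omega) (by omega) (by omega) (by omega) (by omega)).trans hc.fr_rtype
    · exact (hk 176 8 (by omega) (by omega) (by omega) (by omega) (by omega) (by omega) (by omega)).trans hc.fr_pcd
    · exact (hk 240 8 (by omega) (by omega) (by omega) (by omega) (by omega) (by omega) (by omega)).trans hc.fr_si
    · exact hsame
    · exact hc.shadow.untouched hun
    · exact hbits
    · exact hbusy
    · exact htb'
    · rw [hmu]
      exact hc.mu_le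
  refine ⟨hc', ?_, ?_⟩
  · intro pass hp
    refine ⟨hp.rtype2, hp.ch_ge, hp.pass_le, ?_, ?_, ?_⟩
    · exact (hk 168 4 (by omega) (by omega) (by omega) (by omega) (by omega) (by omega) (by omega)).trans hp.sl_pass
    · exact (hk 228 4 (by omega) (by omega) (by omega) (by omega) (by omega) (by omega) (by omega)).trans hp.sl_tap
    · exact (hk 208 4 (by omega) (by omega) (by omega) (by omega) (by omega) (by omega) (by omega)).trans hp.sl_n
  · intro j m hj hm hfill
    have hres := hc.resAt hent
    have hrd : ResidueReads v.mem g.f v'.mem g.f g.r :=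
      ⟨hc'.reads.begin.trans hc.reads.begin.symm, hc'.reads.end_.trans hc.reads.end_.symm,
       hc'.reads.part_size.trans hc.reads.part_size.symm, hc'.reads.classifications.trans hc.reads.classifications.symm,
       hc'.reads.classbook.trans hc.reads.classbook.symm, hc'.reads.classdata.trans hc.reads.classdata.symm,
       hc'.reads.residue_books.trans hc.reads.residue_books.symm, hc'.reads.codebook_count.trans hc.reads.codebook_count.symm,
       hc'.reads.cbk.trans hc.reads.cbk.symm, hc'.reads.E.trans hc.reads.E.symm, hc'.reads.W.trans hc.reads.W.symm⟩
    exact hfill.frame hj hm hc.tb.size hTBk hrd (hall _ hres.R8a)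




/-- `z = begin + pcount·part_size` as the machine computes it (`imul`, `add` on 32 bits), `z & 1` and `z sar 1`, when `z < 2^31`. -/
theorem z_val (a b c : BitVec 32) (z : Nat) (hz : a.toNat + b.toNat * c.toNat = z) (hlt : z < 2 ^ 31) :
    (a + b * c).toNat = z ∧ ((a + b * c) &&& 1#32).toNat = z % 2 ∧ ((a + b * c).sshiftRight 1).toNat = z / 2 := by
  have e : (a + b * c).toNat = z := by
    rw [BitVec.toNat_add, BitVec.toNat_mul]
    have h1 : b.toNat * c.toNat < 2 ^ 32 := by omega
    rw [Nat.mod_eq_of_lt h1, hz]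
    exact Nat.mod_eq_of_lt (by omega)
  refine ⟨e, ?_, ?_⟩
  · rw [BitVec.toNat_and, e]
    exact Nat.and_one_is_mod z
  · have hm : (a + b * c).msb = false := by
      rw [BitVec.msb_eq_decide]
      simp only [decide_eq_false_iff_not, Nat.not_le]
      omega
    rw [BitVec.sshiftRight_eq_of_msb_false hm, BitVec.toNat_ushiftRight, e, Nat.shiftRight_eq_div_pow]

/-- `n ≤ 4096` (P1 + HD3) and `part_read ≤ 8192`. -/
theorem n_prd_le {u₀ : State} {g : G} (hent : Entered u₀ g) : g.n ≤ 4096 ∧ g.PRD ≤ 8192 := by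
  have h3 := Vorbis.VorbisOK.hd3v (groups_laws g.len) hent.vorbis
  have hn := hent.args.n_le
  have hp : g.PRD ≤ 2 * g.n := Residue.partReadDec_le _ _ _ _
  have hb : bsize g.e.mem g.f 1 = (stb_vorbis.blocksize_1 g.e.mem g.f).toNat := rfl
  have hhi := h3.hi
  omega

/-- The signed 32-bit comparison of the `while` / `for` heads on small numbers. -/
theorem cmp32 (a b : Nat) (ha : a < 2 ^ 31) (hb : b < 2 ^ 31) :
    (BitVec.ofNat 32 a).toInt ≤ (Word.part Width.w32 (UInt64.ofNat b)).toInt ↔ a ≤ b := by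
  have e1 : (BitVec.ofNat 32 a).toNat = a := toNat_ofNat32 a (by omega)
  have e2 : (Word.part Width.w32 (UInt64.ofNat b)).toNat = b := by
    rw [Asan.part32_toNat, UInt64.toNat_ofNat']
    omega
  rw [toInt_of_lt _ (by omega), toInt_of_lt _ (by omega), e1, e2]
  omega

/-- `&c_inter` as the machine spells it. -/
theorem addr_ci {u₀ : State} {g : G} (hent : Entered u₀ g) : addr g.ci = g.e.reg .rsp - 104 := by
  have h := hent.room.1
  unfold G.ci
  rw [← addr_sub_lit _ 104 (by omega)]
  unfold G.RA
  rw [addr_toNat]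

/-- `&p_inter` as the machine spells it. -/
theorem addr_pi {u₀ : State} {g : G} (hent : Entered u₀ g) : addr g.pi = g.e.reg .rsp - 88 := by
  have h := hent.room.1
  unfold G.pi
  rw [← addr_sub_lit _ 88 (by omega)]
  unfold G.RA
  rw [addr_toNat]

/-- **CI from the two ints just stored**: `c_inter = z % 2`, `p_inter = z / 2` for an offset `z ≤ 2·n` (`ch = 2`). -/
theorem inter_of_z {u₀ : State} {g : G} (hent : Entered u₀ g) (hch2 : g.ch = 2) {m : Mem} {z : Nat} (hz : z ≤ g.n * 2)
    (hn : g.n ≤ 4096)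
    (rc : m.readLE (g.e.reg .rsp - 104) 4 = z % 2) (rp : m.readLE (g.e.reg .rsp - 88) 4 = z / 2) :
    InterAt m g.ci g.pi g.ch g.n := by
  rw [hch2]
  apply InterAt.of_z (z := z) (by omega) hz
  · show sint32 (m.readLE (addr g.ci) 4) = _
    rw [addr_ci hent, rc]
    have := sint32_cases (z % 2)
    omega
  · show sint32 (m.readLE (addr g.pi) 4) = _
    rw [addr_pi hent, rp]
    have := sint32_cases (z / 2)
    omega

/-- **The two exits of the `while` head after `z`, `c_inter`, `p_inter` are set** (state `s`, stores into `stackWins` only):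
DECODE #1 in pass 0, the i-loop's entry in a pass ≥ 1. -/
theorem head_exits {u₀ : State} {g : G} {v s : State} {pass cs pcount z : Nat} (hent : Entered u₀ g) (hc : Common u₀ g v)
    (hch2 : g.ch = 2) (hpath : PathA g pass v) (hwa : WInv v.mem g.f g.r g.TB g.C g.PRD g.W g.rowsA pass cs pcount)
    (hs : Mem.SameExcept (stackWins g) v.mem s.mem) (hun : ShadowUntouched v.mem s.mem)
    (rbp : s.reg .rbp = g.e.reg .rsp - 8) (rsp : s.reg .rsp = g.e.reg .rsp - 248)
    (code : CodeOK u₀ s.mem) (inv : abiInv s)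
    (r14 : s.reg .r14 = UInt64.ofNat g.r) (r15 : s.reg .r15 = UInt64.ofNat pcount)
    (sl_cs : s.mem.readLE (g.e.reg .rsp - 224) 4 = cs) (hlt : pcount < g.PRD) (hz : z ≤ g.n * 2)
    (rc : s.mem.readLE (g.e.reg .rsp - 104) 4 = z % 2) (rp : s.mem.readLE (g.e.reg .rsp - 88) 4 = z / 2) :
    (s.rip = L.decode_residue.cut10 → pass = 0 → At10 u₀ g cs pcount s) ∧
      (s.rip = L.decode_residue.cut16 → 1 ≤ pass → At16 u₀ g pass cs pcount s) := by
  obtain ⟨hc', hpath', hfill⟩ := common_stack hent hc hs hun rbp rsp code inv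
  have hW := hc.w_pos hent
  have hn := (n_prd_le hent).1
  have hC : 0 < g.C := by
    have := hent.args.ch_le
    unfold G.C
    omega
  have hwa' : WInv s.mem g.f g.r g.TB g.C g.PRD g.W g.rowsA pass cs pcount := by
    apply hwa.frame (fun j h => h) ?_ hW
    intro j m hj hf hm
    have e : j = 0 := hj
    exact hfill j m (by omega) hm hf
  have hinter := inter_of_z hent hch2 hz hn rc rp
  constructor
  · intro hrip hp0
    subst hp0
    exact ⟨hrip, hc', hch2, r14, ⟨hpath' 0 hpath, r15, sl_cs, hwa', hlt, hinter⟩⟩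
  · intro hrip hp1
    exact ⟨hrip, hc', hch2, r14, ⟨hpath' pass hpath, r15, sl_cs, hwa'.enterK hp1 hlt, hinter⟩⟩


/-- **The `while` head** (0x10f2a3 … 0x10f2e0 / 0x10f30f): `pcount ≥ part_read` → the pass latch; else `z`, `c_inter`, `p_inter` are
set (two checks of the record, CI by fact K) → DECODE #1 (pass 0) or the i-loop's entry (pass ≥ 1). -/
theorem head_step {Lay : Layout} (hLay : Lay.hi = 0x1000000) {μ : Microarch} (hμ : UserX.MicroOK μ) {u₀ : State}
    (hcode : HasCodeNat Lay u₀ Vorbis.L.decode_residue.entry Vorbis.Code.code_decode_residue.nat Vorbis.L.decode_residue.size)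
    (h_load4 : Asan.SmallCheck Lay μ Vorbis.WayInv (Vorbis.CodeOK u₀) [.rax, .rcx, .rdx] 4 Vorbis.L.__asan_load4_noabort.entry)
    {g : G} (hent : Entered u₀ g) (pass cs pcount : Nat) (v : State) (hat : At15 u₀ g pass cs pcount v) :
    ReachVia Lay μ WayInv v (HeadExit u₀ g pass cs pcount) := by
  obtain ⟨hrip, hc, hch2, hr14, hloop⟩ := hat
  obtain ⟨hpath, hr15, hslcs, hwa⟩ := hloop
  have he := hent.entry
  v_entry he
  have b_rsp := hc.rsp
  have b_rbp := hc.rbp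
  have w_eq : Mem.EqOn Vorbis.L.textLo Vorbis.L.textHi u₀.mem v.mem := hc.code
  have hdf : v.flags .df = false := (show abiInv _ from hc.inv).1
  have hmx : v.mxcsr &&& 0x1F80 = 0x1F80 := (show abiInv _ from hc.inv).2
  have hsse := Vorbis.sseOK_of_abiInv hc.inv
  have l_prd := hc.fr_prd
  have l_pass := hpath.sl_pass
  obtain ⟨hrw1, hrw2, hrw3⟩ := r_where hent hc
  have b_r14 : v.reg .r14 = addr g.r := hr14
  obtain ⟨bg, hbg⟩ : ∃ bg, Residue.begin v.mem g.r = bg := ⟨_, rfl⟩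
  obtain ⟨ps, hps⟩ : ∃ ps, Residue.part_size v.mem g.r = ps := ⟨_, rfl⟩
  have l_bg : v.mem.readLE (addr g.r) 4 = bg := by
    rw [← hbg]
    simp only [vacc, voff]
    rfl
  have l_ps : v.mem.readLE (addr g.r + 8) 4 = ps := by
    rw [← hps]
    simp only [vfield, vacc, voff]
  have hrn : (addr g.r).toNat = g.r := toNat_addr _ (by omega)
  obtain ⟨hn4096, hprd8192⟩ := n_prd_le hent
  have hW := hc.w_pos hent
  have hpc_le : pcount ≤ g.PRD := by
    have h := hwa.head
    unfold Res.WHead at h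
    omega
  have hres := hc.resAt hent
  have hR : ResidueOK g.Blk v.mem g.f := hc.point.vorbis.residue
  have hL : BlkLive g.Blk g.Live' := hc.point.env.live
  have hrnlt := hc.rn_lt hent
  have hcfg := hc.config_at
  clear hr14
  u_walk hcode [hμ.vendor] until [Vorbis.L.decode_residue.cut10, Vorbis.L.decode_residue.cut16, Vorbis.L.decode_residue.cut24] span [Vorbis.L.textLo, Vorbis.L.textHi] side (v_side)
  · -- 0x10f2b1: the check of `r->begin`
    have hun : ShadowUntouched v.mem s_10f2b1.mem := by v_untouched
    have hs : Site g.Live' g.r 4 := hR.site_record hL hrnlt 0 4 (by simp only [voff]; omega) (by omega) (by rw [hcfg]; omega)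
    exact check_site hc.shadow hun hs hrn
  · -- 0x10f2bd: the check of `r->part_size`
    have hun : ShadowUntouched v.mem s_10f2bd.mem := by v_untouched
    have hs : Site g.Live' (g.r + 8) 4 := hR.site_record hL hrnlt 8 4 (by simp only [voff]; omega) (by omega) (by rw [hcfg])
    refine check_site hc.shadow hun hs ?_
    u_omega
  · -- `pcount ≥ part_read`: the pass latch 0x10f6a0
    have hge : g.PRD ≤ pcount := (cmp32 _ _ (by omega) (by omega)).mp hbr_10f2ac
    have hs : Mem.SameExcept (stackWins g) v.mem s_10f30f.mem := by
      rw [w_mem]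
      exact Mem.SameExcept.refl _ _
    have hun : ShadowUntouched v.mem s_10f30f.mem := by
      rw [w_mem]
      exact Mem.EqOn.refl _ _ _
    obtain ⟨hc', hpath', hfill⟩ := common_stack hent hc hs hun ((w_kept .rbp rfl).trans b_rbp)
      ((w_kept .rsp rfl).trans b_rsp) w_eq (by v_inv)
    refine ReachVia.done ?_
    unfold HeadExit
    refine Or.inr (Or.inr ⟨w_rip, hc', hpath' pass hpath, w_r15, ?_⟩)
    rw [w_mem]
    exact hwa.exit_fill hW hge 0 rfl
  · -- pass 0: DECODE #1 at 0x10ef70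
    have hlt : pcount < g.PRD := by
      have hnot : ¬ g.PRD ≤ pcount := fun hle => hbr_10f2ac ((cmp32 g.PRD pcount (by omega) (by omega)).mpr hle)
      omega
    have hp0 : pass = 0 := by
      have := hpath.pass_le
      omega
    have hK := Residue.factK_pos hres (n := g.n) (ch := g.ch) (pc := pcount) (by omega) (by
      have e := hc.prd
      rw [hpath.rtype2] at e
      rw [e]
      exact hlt)
    rw [hbg, hps, hch2] at hK
    obtain ⟨zv, zc, zp⟩ := z_val (BitVec.ofNat 32 bg) (Word.part .w32 (UInt64.ofNat pcount)) (BitVec.ofNat 32 ps)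
      (bg + pcount * ps) (by
        rw [toNat_ofNat32 bg (by omega), toNat_ofNat32 ps (by omega), Asan.part32_toNat, UInt64.toNat_ofNat']
        have : pcount % 2 ^ 64 % 2 ^ 32 = pcount := by omega
        rw [this]) (by omega)
    have hs : Mem.SameExcept (stackWins g) v.mem s_10f2e0.mem := by
      unfold stackWins
      rw [w_mem]
      u_same
    have hun : ShadowUntouched v.mem s_10f2e0.mem := by v_untouched
    have rc : s_10f2e0.mem.readLE (g.e.reg .rsp - 104) 4 = (bg + pcount * ps) % 2 := by
      u_resolve
      rw [zc]
      exact Nat.mod_eq_of_lt (by omega)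
    have rp : s_10f2e0.mem.readLE (g.e.reg .rsp - 88) 4 = (bg + pcount * ps) / 2 := by
      u_resolve
      rw [zp]
      exact Nat.mod_eq_of_lt (by omega)
    have sl : s_10f2e0.mem.readLE (g.e.reg .rsp - 224) 4 = cs := by u_resolve
    obtain ⟨h10, h16⟩ := head_exits (z := bg + pcount * ps) hent hc hch2 hpath hwa hs hun ((w_kept .rbp rfl).trans b_rbp)
      w_rsp w_eq (by v_inv) ((w_kept .r14 rfl).trans b_r14) ((w_kept .r15 rfl).trans hr15) sl hlt (by omega) rc rp
    refine ReachVia.done ?_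
    unfold HeadExit
    exact Or.inl ⟨hp0, hlt, h10 w_rip hp0⟩
  · -- a pass ≥ 1: the i-loop's entry 0x10f2e6
    have hlt : pcount < g.PRD := by
      have hnot : ¬ g.PRD ≤ pcount := fun hle => hbr_10f2ac ((cmp32 g.PRD pcount (by omega) (by omega)).mpr hle)
      omega
    have hp1 : 1 ≤ pass := by
      have := hpath.pass_le
      omega
    have hK := Residue.factK_pos hres (n := g.n) (ch := g.ch) (pc := pcount) (by omega) (by
      have e := hc.prd
      rw [hpath.rtype2] at e
      rw [e]
      exact hlt)
    rw [hbg, hps, hch2] at hK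
    obtain ⟨zv, zc, zp⟩ := z_val (BitVec.ofNat 32 bg) (Word.part .w32 (UInt64.ofNat pcount)) (BitVec.ofNat 32 ps)
      (bg + pcount * ps) (by
        rw [toNat_ofNat32 bg (by omega), toNat_ofNat32 ps (by omega), Asan.part32_toNat, UInt64.toNat_ofNat']
        have : pcount % 2 ^ 64 % 2 ^ 32 = pcount := by omega
        rw [this]) (by omega)
    have hs : Mem.SameExcept (stackWins g) v.mem s_10f2e0.mem := by
      unfold stackWins
      rw [w_mem]
      u_same
    have hun : ShadowUntouched v.mem s_10f2e0.mem := by v_untouched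
    have rc : s_10f2e0.mem.readLE (g.e.reg .rsp - 104) 4 = (bg + pcount * ps) % 2 := by
      u_resolve
      rw [zc]
      exact Nat.mod_eq_of_lt (by omega)
    have rp : s_10f2e0.mem.readLE (g.e.reg .rsp - 88) 4 = (bg + pcount * ps) / 2 := by
      u_resolve
      rw [zp]
      exact Nat.mod_eq_of_lt (by omega)
    have sl : s_10f2e0.mem.readLE (g.e.reg .rsp - 224) 4 = cs := by u_resolve
    obtain ⟨h10, h16⟩ := head_exits (z := bg + pcount * ps) hent hc hch2 hpath hwa hs hun ((w_kept .rbp rfl).trans b_rbp)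
      w_rsp w_eq (by v_inv) ((w_kept .r14 rfl).trans b_r14) ((w_kept .r15 rfl).trans hr15) sl hlt (by omega) rc rp
    refine ReachVia.done ?_
    unfold HeadExit
    exact Or.inr (Or.inl ⟨hp1, h16 w_rip hp1⟩)




/-- The signed 32-bit `<` of the `for` head on small numbers. -/
theorem lt32 (b a : Nat) (hb : b < 2 ^ 31) (ha : a < 2 ^ 31) :
    (Word.part Width.w32 (UInt64.ofNat b)).toInt < (BitVec.ofNat 32 a).toInt ↔ b < a := by
  have e1 : (BitVec.ofNat 32 a).toNat = a := toNat_ofNat32 a (by omega)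
  have e2 : (Word.part Width.w32 (UInt64.ofNat b)).toNat = b := by
    rw [Asan.part32_toNat, UInt64.toNat_ofNat']
    omega
  rw [toInt_of_lt _ (by omega), toInt_of_lt _ (by omega), e1, e2]
  omega

/-- A signed 32-bit value is below `2^31` as a natural number. -/
theorem sint32_toNat_lt (n : Nat) (h : n < 2 ^ 32) : (sint32 n).toNat < 2 ^ 31 := by
  have := sint32_cases n
  omega

/-- `classwords < 2^31`: it is the non-negative part of an `int`. -/
theorem w_lt (g : G) : g.W < 2 ^ 31 :=
  sint32_toNat_lt _ (Mem.u32_lt _ _)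

/-- **`++class_set` after the i-loop is left** (state `s` at the next `while` head 0x10f2a3, stores into `stackWins` only):
WA for `class_set + 1` (`WInnerInv.leave`). -/
theorem cs_exit {u₀ : State} {g : G} {v s : State} {pass cs i pcount : Nat} (hent : Entered u₀ g) (hc : Common u₀ g v)
    (hch2 : g.ch = 2) (hpath : PathA g pass v)
    (hwi : WInnerInv v.mem g.f g.r g.TB g.C g.PRD g.W g.rowsA pass cs i pcount)
    (hs : Mem.SameExcept (stackWins g) v.mem s.mem) (hun : ShadowUntouched v.mem s.mem)
    (rbp : s.reg .rbp = g.e.reg .rsp - 8) (rsp : s.reg .rsp = g.e.reg .rsp - 248)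
    (code : CodeOK u₀ s.mem) (inv : abiInv s)
    (r14 : s.reg .r14 = UInt64.ofNat g.r) (r15 : s.reg .r15 = UInt64.ofNat pcount)
    (sl_cs : s.mem.readLE (g.e.reg .rsp - 224) 4 = cs + 1) (hex : g.W ≤ i ∨ g.PRD ≤ pcount)
    (hrip : s.rip = L.decode_residue.cut15) : At15 u₀ g pass (cs + 1) pcount s := by
  obtain ⟨hc', hpath', hfill⟩ := common_stack hent hc hs hun rbp rsp code inv
  have hW := hc.w_pos hent
  have hC : 0 < g.C := by
    have := hent.args.ch_le
    unfold G.C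
    omega
  have hwi' : WInnerInv s.mem g.f g.r g.TB g.C g.PRD g.W g.rowsA pass cs i pcount := by
    apply hwi.frame (fun j h => h) ?_ hW
    intro j m hj hf hm
    have e : j = 0 := hj
    exact hfill j m (by omega) hm hf
  exact ⟨hrip, hc', hch2, r14, ⟨hpath' pass hpath, r15, sl_cs, hwi'.leave hW hex⟩⟩

/-- **The head of the i-loop** (0x10f1a7 … 0x10f1c9, then 0x10f29c `++class_set`): `i ≥ classwords` or `pcount ≥ part_read` → the
next `while` head with `class_set + 1` (`WInnerInv.leave`); else the body at 0x10f1cf with nothing changed. -/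
theorem iloop_head {Lay : Layout} (hLay : Lay.hi = 0x1000000) {μ : Microarch} (hμ : UserX.MicroOK μ) {u₀ : State}
    (hcode : HasCodeNat Lay u₀ Vorbis.L.decode_residue.entry Vorbis.Code.code_decode_residue.nat Vorbis.L.decode_residue.size)
    {g : G} (hent : Entered u₀ g) (pass cs i pcount : Nat) (v : State)
    (hat : AtIn L.decode_residue.cut14 u₀ g pass cs i pcount v) :
    ReachVia Lay μ WayInv v (fun v' =>
      ((g.W ≤ i ∨ g.PRD ≤ pcount) ∧ At15 u₀ g pass (cs + 1) pcount v') ∨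
      (i < g.W ∧ pcount < g.PRD ∧ AtIn 0x10f1cf u₀ g pass cs i pcount v')) := by
  obtain ⟨hrip, hc, hch2, hr14, hr13, hpath, hr15, hslcs, hwi, hinter⟩ := hat
  have he := hent.entry
  v_entry he
  have b_rsp := hc.rsp
  have b_rbp := hc.rbp
  have w_eq : Mem.EqOn Vorbis.L.textLo Vorbis.L.textHi u₀.mem v.mem := hc.code
  have hdf : v.flags .df = false := (show abiInv _ from hc.inv).1
  have hmx : v.mxcsr &&& 0x1F80 = 0x1F80 := (show abiInv _ from hc.inv).2
  have hsse := Vorbis.sseOK_of_abiInv hc.inv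
  have l_prd := hc.fr_prd
  have l_w := hc.fr_w
  obtain ⟨hn4096, hprd8192⟩ := n_prd_le hent
  have hW := hc.w_pos hent
  have hWlt := w_lt g
  have hin := hwi.inner
  have hi_le := hin.i_le
  have hpc_le := hin.pcount_le
  have hcs_lt := hwi.slot_lt hW
  u_walk hcode [hμ.vendor] until [Vorbis.L.decode_residue.cut15, 0x10f1cf] span [Vorbis.L.textLo, Vorbis.L.textHi] side (v_side)
  · -- `i ≥ classwords`: `++class_set`, the next `while` head
    have hex : g.W ≤ i := by
      by_cases hlt : (Word.part Width.w32 (UInt64.ofNat i)).toInt < (BitVec.ofNat 32 g.W).toInt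
      · rw [if_pos hlt] at hbr_10f1c1
        exact absurd hbr_10f1c1 (by decide)
      · have hnot : ¬ i < g.W := fun h => hlt ((lt32 i g.W (by omega) hWlt).mpr h)
        omega
    have hs : Mem.SameExcept (stackWins g) v.mem s_10f29c.mem := by
      unfold stackWins
      rw [w_mem]
      u_same
    have hun : ShadowUntouched v.mem s_10f29c.mem := by v_untouched
    have sl : s_10f29c.mem.readLE (g.e.reg .rsp - 224) 4 = cs + 1 := by
      u_resolve
      rw [BitVec.toNat_add, toNat_ofNat32 cs (by omega)]
      show (cs + 1) % 2 ^ 32 % 4294967296 = cs + 1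
      omega
    refine ReachVia.done (Or.inl ⟨Or.inl hex, ?_⟩)
    exact cs_exit hent hc hch2 hpath hwi hs hun ((w_kept .rbp rfl).trans b_rbp) ((w_kept .rsp rfl).trans b_rsp) w_eq
      (by v_inv) ((w_kept .r14 rfl).trans hr14) ((w_kept .r15 rfl).trans hr15) sl (Or.inl hex) w_rip
  · -- `pcount ≥ part_read`: the same
    have hex : g.PRD ≤ pcount := by
      by_cases hlt : (Word.part Width.w32 (UInt64.ofNat pcount)).toInt < (BitVec.ofNat 32 g.PRD).toInt
      · rw [if_pos hlt] at hbr_10f1c9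
        exact absurd hbr_10f1c9 (by decide)
      · have hnot : ¬ pcount < g.PRD := fun h => hlt ((lt32 pcount g.PRD (by omega) (by omega)).mpr h)
        omega
    have hs : Mem.SameExcept (stackWins g) v.mem s_10f29c.mem := by
      unfold stackWins
      rw [w_mem]
      u_same
    have hun : ShadowUntouched v.mem s_10f29c.mem := by v_untouched
    have sl : s_10f29c.mem.readLE (g.e.reg .rsp - 224) 4 = cs + 1 := by
      u_resolve
      rw [BitVec.toNat_add, toNat_ofNat32 cs (by omega)]
      show (cs + 1) % 2 ^ 32 % 4294967296 = cs + 1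
      omega
    refine ReachVia.done (Or.inl ⟨Or.inr hex, ?_⟩)
    exact cs_exit hent hc hch2 hpath hwi hs hun ((w_kept .rbp rfl).trans b_rbp) ((w_kept .rsp rfl).trans b_rsp) w_eq
      (by v_inv) ((w_kept .r14 rfl).trans hr14) ((w_kept .r15 rfl).trans hr15) sl (Or.inr hex) w_rip
  · -- into the body: nothing changed but RIP, rax, rdx, rsi and the flags
    have hi : i < g.W := by
      by_cases hlt : (Word.part Width.w32 (UInt64.ofNat i)).toInt < (BitVec.ofNat 32 g.W).toInt
      · exact (lt32 i g.W (by omega) hWlt).mp hlt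
      · rw [if_neg hlt] at hbr_10f1c1
        exact absurd rfl hbr_10f1c1
    have hp : pcount < g.PRD := by
      by_cases hlt : (Word.part Width.w32 (UInt64.ofNat pcount)).toInt < (BitVec.ofNat 32 g.PRD).toInt
      · exact (lt32 pcount g.PRD (by omega) (by omega)).mp hlt
      · rw [if_neg hlt] at hbr_10f1c9
        exact absurd rfl hbr_10f1c9
    have hs : Mem.SameExcept (stackWins g) v.mem s_10f1c9.mem := by
      rw [w_mem]
      exact Mem.SameExcept.refl _ _
    have hun : ShadowUntouched v.mem s_10f1c9.mem := by
      rw [w_mem]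
      exact Mem.EqOn.refl _ _ _
    obtain ⟨hc', hpath', hfill⟩ := common_stack hent hc hs hun ((w_kept .rbp rfl).trans b_rbp)
      ((w_kept .rsp rfl).trans b_rsp) w_eq (by v_inv)
    refine ReachVia.done (Or.inr ⟨hi, hp, w_rip, hc', hch2, (w_kept .r14 rfl).trans hr14, (w_kept .r13 rfl).trans hr13,
      hpath' pass hpath, (w_kept .r15 rfl).trans hr15, ?_, ?_, ?_⟩)
    · rw [w_mem]
      exact hslcs
    · rw [w_mem]
      exact hwi
    · rw [w_mem]
      exact hinter




/-- **The i-loop's entry** (0x10f2e6 `mov r13d,0 ; jmp 10f1a7`): the loop invariant with `i = 0`. -/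
theorem iloop_entry {Lay : Layout} (hLay : Lay.hi = 0x1000000) {μ : Microarch} (hμ : UserX.MicroOK μ) {u₀ : State}
    (hcode : HasCodeNat Lay u₀ Vorbis.L.decode_residue.entry Vorbis.Code.code_decode_residue.nat Vorbis.L.decode_residue.size)
    {g : G} (hent : Entered u₀ g) (pass cs pcount : Nat) (v : State) (hat : At16 u₀ g pass cs pcount v) :
    ReachVia Lay μ WayInv v (fun v' => AtIn L.decode_residue.cut14 u₀ g pass cs 0 pcount v') := by
  obtain ⟨hrip, hc, hch2, hr14, hloop⟩ := hat
  obtain ⟨hpath, hr15, hslcs, hwi, hinter⟩ := hloop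
  have he := hent.entry
  v_entry he
  have b_rsp := hc.rsp
  have b_rbp := hc.rbp
  have w_eq : Mem.EqOn Vorbis.L.textLo Vorbis.L.textHi u₀.mem v.mem := hc.code
  have hdf : v.flags .df = false := (show abiInv _ from hc.inv).1
  have hmx : v.mxcsr &&& 0x1F80 = 0x1F80 := (show abiInv _ from hc.inv).2
  have hsse := Vorbis.sseOK_of_abiInv hc.inv
  u_walk hcode [hμ.vendor] until [Vorbis.L.decode_residue.cut14] span [Vorbis.L.textLo, Vorbis.L.textHi] side (v_side)
  have hs : Mem.SameExcept (stackWins g) v.mem s_10f2ec.mem := by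
    rw [w_mem]
    exact Mem.SameExcept.refl _ _
  have hun : ShadowUntouched v.mem s_10f2ec.mem := by
    rw [w_mem]
    exact Mem.EqOn.refl _ _ _
  obtain ⟨hc', hpath', hfill⟩ := common_stack hent hc hs hun ((w_kept .rbp rfl).trans b_rbp)
    ((w_kept .rsp rfl).trans b_rsp) w_eq (by v_inv)
  refine ReachVia.done ⟨w_rip, hc', hch2, (w_kept .r14 rfl).trans hr14, w_r13, hpath' pass hpath,
    (w_kept .r15 rfl).trans hr15, ?_, ?_, ?_⟩
  · rw [w_mem]
    exact hslcs
  · rw [w_mem]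
    exact hwi
  · rw [w_mem]
    exact hinter

/-- Where the temp block lies: inside the data space, off the stack region (`ADOBusy.tblock`, `ArenaOK.tblock_range`, AR1, AR1x). -/
theorem tb_where {u₀ : State} {g : G} {v : State} (hc : Common u₀ g v) :
    0x100000 ≤ g.TB.base ∧ g.TB.base + g.TB.size ≤ 0xC00000 ∧
      (g.TB.base + g.TB.size ≤ 0x700000 ∨ 0x800000 ≤ g.TB.base) := by
  have htb := hc.tblock
  have hrange := hc.point.busy.ok.tblock_range htb
  have h1x := hc.point.busy.ok.AR1x
  have har1 := hc.point.busy.ok.AR1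
  have hr8 := le_r8 g.TB.size
  omega

/-- `movsxd rbx, [class_set] ; shl rbx, k` for a small non-negative int: the scaled index as a number. -/
theorem sext_shl (x k : Nat) (hx : x < 2 ^ 31) (hk : k < 8) :
    Word.ofBV (BitVec.signExtend 64 (BitVec.ofNat 32 x)) <<< (UInt64.ofNat k) = addr (2 ^ k * x) := by
  have e1 : (Word.ofBV (BitVec.signExtend 64 (BitVec.ofNat 32 x))).toNat = x := by
    rw [toNat_sext32 _ (by rw [toNat_ofNat32 x (by omega)]; exact hx), toNat_ofNat32 x (by omega)]
  apply eq_addr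
  rw [UInt64.toNat_shiftLeft, e1, UInt64.toNat_ofNat', Nat.shiftLeft_eq]
  have h2 : k % 2 ^ 64 % 64 = k := by omega
  rw [h2]
  have : 2 ^ k ≤ 128 := by
    have : k ≤ 7 := by omega
    calc 2 ^ k ≤ 2 ^ 7 := Nat.pow_le_pow_right (by omega) this
      _ = 128 := by decide
  have hm : x * 2 ^ k < 2 ^ 64 := by
    have := Nat.mul_le_mul (Nat.le_of_lt hx) this
    omega
  rw [Nat.mod_eq_of_lt hm, Nat.mul_comm]


/-- The walker's form of `lea edx, [rbx + rax]`: the low half of the 64-bit sum of two zero-extended 32-bit values. -/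
theorem z_lea (x y : BitVec 32) :
    (BitVec.setWidth 32 (Word.ofBV x + Word.ofBV y).toBitVec).toNat = (x.toNat + y.toNat) % 2 ^ 32 := by
  rw [BitVec.toNat_setWidth, UInt64.toNat_toBitVec, UInt64.toNat_add, toNat_ofBV32, toNat_ofBV32]
  have := x.isLt
  have := y.isLt
  omega

/-- `movsxd r12, [pass]` for a small non-negative int. -/
theorem sext_ofNat (x : Nat) (hx : x < 2 ^ 31) : Word.ofBV (BitVec.signExtend 64 (BitVec.ofNat 32 x)) = addr x := by
  apply eq_addr
  rw [toNat_sext32 _ (by rw [toNat_ofNat32 x (by omega)]; exact hx), toNat_ofNat32 x (by omega)]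

/-- `movzx ebx, BYTE [rbx] ; movzx ebx, bl ; shl rbx, 4`: the class number times 16. -/
theorem zext_shl4 (c : Nat) (hc : c < 256) :
    Word.ofBV (BitVec.setWidth 64 (BitVec.zeroExtend 32 (BitVec.setWidth 8 (BitVec.zeroExtend 32 (BitVec.ofNat 8 c))))) <<< 4
      = addr (16 * c) := by
  apply eq_addr
  have e : (Word.ofBV (BitVec.setWidth 64 (BitVec.zeroExtend 32 (BitVec.setWidth 8 (BitVec.zeroExtend 32
      (BitVec.ofNat 8 c)))))).toNat = c := by
    unfold Word.ofBV
    simp only [UInt64.toNat_ofBitVec, BitVec.toNat_setWidth, BitVec.zeroExtend, BitVec.toNat_ofNat]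
    omega
  show (_ <<< (UInt64.ofNat 4)).toNat = _
  rw [UInt64.toNat_shiftLeft, e, UInt64.toNat_ofNat', Nat.shiftLeft_eq]
  have h2 : 4 % 2 ^ 64 % 64 = 4 := by decide
  rw [h2]
  omega


/-- `movsxd rax, r13d` for a small non-negative int. -/
theorem sext_part (x : Nat) (hx : x < 2 ^ 31) :
    Word.ofBV (BitVec.signExtend 64 (Word.part Width.w32 (UInt64.ofNat x))) = addr x := by
  have e : (Word.part Width.w32 (UInt64.ofNat x)).toNat = x := by
    rw [Asan.part32_toNat, UInt64.toNat_ofNat']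
    omega
  apply eq_addr
  rw [toNat_sext32 _ (by rw [e]; exact hx), e]

/-- **The front of the i-loop's body** (0x10f1cf … 0x10f260; C 2184–2190): `z`, `c = part_classdata[0][class_set][i]`,
`b = r->residue_books[c][pass]`: seven check sites (the record ×3, TB's row pointer, the slot, the class byte through a ROWPTR,
`residue_books[c][pass]` by R8b + R8). Walked in four stages: the three computed addresses are restated as numbers in between. -/
theorem body_front {Lay : Layout} (hLay : Lay.hi = 0x1000000) {μ : Microarch} (hμ : UserX.MicroOK μ) {u₀ : State}
    (hcode : HasCodeNat Lay u₀ Vorbis.L.decode_residue.entry Vorbis.Code.code_decode_residue.nat Vorbis.L.decode_residue.size)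
    (h_load8 : Asan.SmallCheck Lay μ Vorbis.WayInv (Vorbis.CodeOK u₀) [.rax, .rcx, .rdx] 8 Vorbis.L.__asan_load8_noabort.entry)
    (h_load4 : Asan.SmallCheck Lay μ Vorbis.WayInv (Vorbis.CodeOK u₀) [.rax, .rcx, .rdx] 4 Vorbis.L.__asan_load4_noabort.entry)
    (h_load1 : Asan.SmallCheck Lay μ Vorbis.WayInv (Vorbis.CodeOK u₀) [.rax, .rdx] 1 Vorbis.L.__asan_load1_noabort.entry)
    (h_load2 : Asan.SmallCheck Lay μ Vorbis.WayInv (Vorbis.CodeOK u₀) [.rax, .rcx, .rdx] 2 Vorbis.L.__asan_load2_noabort.entry)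
    {g : G} (hent : Entered u₀ g) (pass cs i pcount : Nat) (v : State) (hi : i < g.W) (hp : pcount < g.PRD)
    (hat : AtIn 0x10f1cf u₀ g pass cs i pcount v) :
    ReachVia Lay μ WayInv v (fun v' => ∃ b, AtB 0x10f260 u₀ g pass cs i pcount b v') := by
  obtain ⟨hrip, hc, hch2, hr14, hr13, hpath, hr15, hslcs, hwi, hinter⟩ := hat
  have he := hent.entry
  v_entry he
  have b_rsp := hc.rsp
  have b_rbp := hc.rbp
  have w_eq : Mem.EqOn Vorbis.L.textLo Vorbis.L.textHi u₀.mem v.mem := hc.code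
  have hdf : v.flags .df = false := (show abiInv _ from hc.inv).1
  have hmx : v.mxcsr &&& 0x1F80 = 0x1F80 := (show abiInv _ from hc.inv).2
  have hsse := Vorbis.sseOK_of_abiInv hc.inv
  have l_pass := hpath.sl_pass
  have l_pcd := hc.fr_pcd
  obtain ⟨hrw1, hrw2, hrw3⟩ := r_where hent hc
  obtain ⟨htw1, htw2, htw3⟩ := tb_where hc
  have b_r14 : v.reg .r14 = addr g.r := hr14
  obtain ⟨bg, hbg⟩ : ∃ bg, Residue.begin v.mem g.r = bg := ⟨_, rfl⟩
  obtain ⟨ps, hps⟩ : ∃ ps, Residue.part_size v.mem g.r = ps := ⟨_, rfl⟩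
  have l_bg : v.mem.readLE (addr g.r) 4 = bg := by
    rw [← hbg]
    simp only [vacc, voff]
    rfl
  have l_ps : v.mem.readLE (addr g.r + 8) 4 = ps := by
    rw [← hps]
    simp only [vfield, vacc, voff]
  have hrn : (addr g.r).toNat = g.r := toNat_addr _ (by omega)
  have hC : 0 < g.C := by
    have := hent.args.ch_le
    unfold G.C
    omega
  have l_row : v.mem.readLE (UInt64.ofNat g.TB.base) 8 = rowBase g.TB g.C g.PRD 0 := by
    have h := hc.tb.rows 0 hC
    exact h
  have htn : (UInt64.ofNat g.TB.base).toNat = g.TB.base := toNat_addr _ (by omega)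
  have hW := hc.w_pos hent
  obtain ⟨hn4096, hprd8192⟩ := n_prd_le hent
  have hcs_lt := hwi.slot_lt hW
  have hres := hc.resAt hent
  have hR : ResidueOK g.Blk v.mem g.f := hc.point.vorbis.residue
  have hL : BlkLive g.Blk g.Live' := hc.point.env.live
  have hrnlt := hc.rn_lt hent
  have hcfg := hc.config_at
  have hTBl : g.TB.live g.Live' := hc.point.busy.ok.tblock_live_inv hc.shadow hc.tblock
  -- the slot `part_classdata[0][class_set]` and the row pointer in it
  have hsin := slot_inside g.TB hC hcs_lt hc.tb.size
  obtain ⟨rp, hrp⟩ : ∃ rp, v.mem.ptr (slot g.TB g.C g.PRD 0 cs) = rp := ⟨_, rfl⟩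
  have hrow : RowPtr v.mem g.f g.r rp := by
    rw [← hrp]
    exact hwi.rowptr hW (j := 0) rfl
  have l_slot : v.mem.readLE (addr (slot g.TB g.C g.PRD 0 cs)) 8 = rp := hrp
  have hsn : (addr (slot g.TB g.C g.PRD 0 cs)).toNat = slot g.TB g.C g.PRD 0 cs := toNat_addr _ (by omega)
  obtain ⟨q, hq, hrq⟩ := hrow
  have hBrow := hres.R8a_row q hq
  have hrowin := hc.point.env.ok.inside _ hBrow
  have hrowst := hent.pre.free.offStack _ hBrow
  rw [← hrq, hc.w_eq] at hBrow hrowin hrowst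
  simp only [] at hrowin hrowst
  have hrow : RowPtr v.mem g.f g.r rp := ⟨q, hq, hrq⟩
  obtain ⟨c, hcb⟩ : ∃ c, v.mem.u8 (rp + i) = c := ⟨_, rfl⟩
  have hclt : c < Residue.classifications v.mem g.r := by
    rw [← hcb]
    exact hrow.class_lt hres (by rw [hc.w_eq]; exact hi)
  have l_c : v.mem.readLE (addr (rp + i)) 1 = c := hcb
  have hcn : (addr (rp + i)).toNat = rp + i := toNat_addr _ (by omega)
  have hWlt := w_lt g
  obtain ⟨rbks, hrbks⟩ : ∃ rbks, Residue.residue_books v.mem g.r = rbks := ⟨_, rfl⟩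
  have l_rbks : v.mem.readLE (addr g.r + 24) 8 = rbks := by
    rw [← hrbks]
    simp only [vfield, vacc, voff]
  have hB8 := hres.R8
  have hb8in := hc.point.env.ok.inside _ hB8
  have hb8st := hent.pre.free.offStack _ hB8
  rw [hrbks] at hB8 hb8in hb8st
  simp only [] at hb8in hb8st
  have h6 := hres.R6
  have hc256 : c < 256 := by omega
  have hpass7 := hpath.pass_le
  obtain ⟨b, hb⟩ : ∃ b, v.mem.u16 (rbks + 16 * c + 2 * pass) = b := ⟨_, rfl⟩
  have ea : addr (rbks + 16 * c) + addr pass * 2 = addr (rbks + 16 * c + 2 * pass) := by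
    rw [addr_mul_lit, addr_add_addr]
    congr 1
    omega
  have l_b : v.mem.readLE (addr (rbks + 16 * c) + addr pass * 2) 2 = b := by
    rw [ea]
    exact hb
  have hbn : (addr (rbks + 16 * c) + addr pass * 2).toNat = rbks + 16 * c + 2 * pass := by
    rw [ea]
    exact toNat_addr _ (by omega)
  have hblt : b < 65536 := by
    rw [← hb]
    exact Mem.u16_lt _ _
  have hbook : sint16 b = -1 ∨ (0 ≤ sint16 b ∧ sint16 b < stb_vorbis.codebook_count v.mem g.f) := by
    have h := hres.R8c c pass hclt (by omega)
    have e : Residue.book v.mem g.r c pass = sint16 b := by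
      unfold Residue.book
      rw [hrbks]
      show sint16 (v.mem.u16 (rbks + 16 * c + 2 * pass)) = _
      rw [hb]
    rw [e] at h
    exact h
  have hK := Residue.factK_pos hres (n := g.n) (ch := g.ch) (pc := pcount) (by omega) (by
    have e := hc.prd
    rw [hpath.rtype2] at e
    rw [e]
    exact hp)
  rw [hbg, hps, hch2] at hK
  clear hr14
  u_walk hcode [hμ.vendor] until [0x10f218] span [Vorbis.L.textLo, Vorbis.L.textHi] side (v_side)
  · -- 0x10f1d2: `r->begin`
    have hun : ShadowUntouched v.mem s_10f1d2.mem := by v_untouched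
    have hs : Site g.Live' g.r 4 := hR.site_record hL hrnlt 0 4 (by simp only [voff]; omega) (by omega) (by rw [hcfg]; omega)
    exact check_site hc.shadow hun hs hrn
  · -- 0x10f1de: `r->part_size`
    have hun : ShadowUntouched v.mem s_10f1de.mem := by v_untouched
    have hs : Site g.Live' (g.r + 8) 4 := hR.site_record hL hrnlt 8 4 (by simp only [voff]; omega) (by omega) (by rw [hcfg])
    refine check_site hc.shadow hun hs ?_
    u_omega
  · -- 0x10f204: `part_classdata[0]`, the row pointer of TB
    have hun : ShadowUntouched v.mem s_10f204.mem := by v_untouched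
    have hs : Site g.Live' g.TB.base 8 := hc.tb.site_rowptr hTBl hC (by omega)
    exact check_site hc.shadow hun hs htn
  -- 0x10f218: rbx = &part_classdata[0][class_set]
  have w_rbx' : s_10f214.reg .rbx = addr (slot g.TB g.C g.PRD 0 cs) := by
    have e3 : Word.ofBV (BitVec.signExtend 64 (BitVec.ofNat 32 cs)) <<< 3 = addr (2 ^ 3 * cs) :=
      sext_shl cs 3 (by omega) (by omega)
    rw [w_rbx, e3]
    show addr (2 ^ 3 * cs) + addr (rowBase g.TB g.C g.PRD 0) = _
    rw [addr_add_addr]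
    congr 1
    unfold slot
    omega
  clear w_rbx
  have w_rbx := w_rbx'
  clear w_rbx'
  u_walk hcode [hμ.vendor] until [0x10f22c] span [Vorbis.L.textLo, Vorbis.L.textHi] side (v_side)
  · -- 0x10f21b: the slot `part_classdata[0][class_set]`
    have hun : ShadowUntouched v.mem s_10f21b.mem := by v_untouched
    have hs : Site g.Live' (slot g.TB g.C g.PRD 0 cs) 8 := hc.tb.site_slot hTBl hC hcs_lt (hc.tb.slot_eq hC cs).symm
    exact check_site hc.shadow hun hs hsn
  -- 0x10f22c: rbx = rcx = the address of the class byte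
  have w_rbx' : s_10f229.reg .rbx = addr (rp + i) := by
    rw [w_rbx, sext_part i (by omega)]
    show addr i + addr rp = _
    rw [addr_add_addr, Nat.add_comm]
  have w_rcx' : s_10f229.reg .rcx = addr (rp + i) := by
    rw [w_rcx, sext_part i (by omega)]
    show addr i + addr rp = _
    rw [addr_add_addr, Nat.add_comm]
  clear w_rbx w_rcx
  have w_rbx := w_rbx'
  have w_rcx := w_rcx'
  clear w_rbx' w_rcx'
  u_walk hcode [hμ.vendor] until [0x10f252] span [Vorbis.L.textLo, Vorbis.L.textHi] side (v_side)
  · -- 0x10f22f: the class byte `part_classdata[0][class_set][i]`, inside a row of `classdata` (ROWPTR + i < W)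
    have hun : ShadowUntouched v.mem s_10f22f.mem := by v_untouched
    have hs : Site g.Live' (rp + i) 1 := hrow.site hL hres (by rw [hc.w_eq]; exact hi) rfl
    exact check_site hc.shadow hun hs hcn
  · -- 0x10f23b: `r->residue_books`
    have hun : ShadowUntouched v.mem s_10f23b.mem := by v_untouched
    have hs : Site g.Live' (g.r + 24) 8 := hR.site_record hL hrnlt 24 8 (by simp only [voff]; omega) (by omega) (by rw [hcfg])
    refine check_site hc.shadow hun hs ?_
    u_omega
  -- 0x10f252: rbx = &residue_books[c], r12 = pass
  have w_rbx' : s_10f24b.reg .rbx = addr (rbks + 16 * c) := by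
    rw [w_rbx, zext_shl4 c hc256]
    show addr (16 * c) + addr rbks = _
    rw [addr_add_addr, Nat.add_comm]
  have w_r12' : s_10f24b.reg .r12 = addr pass := by
    rw [w_r12, sext_ofNat pass (by omega)]
  clear w_rbx w_r12
  have w_rbx := w_rbx'
  have w_r12 := w_r12'
  clear w_rbx' w_r12'
  u_walk hcode [hμ.vendor] until [0x10f260] span [Vorbis.L.textLo, Vorbis.L.textHi] side (v_side)
  · -- 0x10f256: `residue_books[c][pass]` (R8; `c < classifications` by R8b, `pass ≤ 7`)
    have hun : ShadowUntouched v.mem s_10f256.mem := by v_untouched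
    have hs : Site g.Live' (rbks + 16 * c + 2 * pass) 2 := hres.site_book hL hclt (k := pass) (by omega) (by rw [hrbks])
    exact check_site hc.shadow hun hs hbn
  -- 0x10f260: the assertion `AtB`
  have hs : Mem.SameExcept (stackWins g) v.mem s_10f25b.mem := by
    unfold stackWins
    rw [w_mem]
    u_same
  have hun : ShadowUntouched v.mem s_10f25b.mem := by v_untouched
  obtain ⟨hc', hpath', hfill⟩ := common_stack hent hc hs hun ((w_kept .rbp rfl).trans b_rbp) w_rsp w_eq (by v_inv)
  have hwi' : WInnerInv s_10f25b.mem g.f g.r g.TB g.C g.PRD g.W g.rowsA pass cs i pcount := by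
    apply hwi.frame (fun j h => h) ?_ hW
    intro j m hj hf hm
    have e : j = 0 := hj
    exact hfill j m (by omega) hm hf
  have hinter' : InterAt s_10f25b.mem g.ci g.pi g.ch g.n := by
    apply hinter.frame
    · show sint32 (s_10f25b.mem.readLE (addr g.ci) 4) = sint32 (v.mem.readLE (addr g.ci) 4)
      rw [addr_ci hent]
      congr 1
      u_resolve
    · show sint32 (s_10f25b.mem.readLE (addr g.pi) 4) = sint32 (v.mem.readLE (addr g.pi) 4)
      rw [addr_pi hent]
      congr 1
      u_resolve
  have sl_cs : s_10f25b.mem.readLE (g.e.reg .rsp - 224) 4 = cs := by u_resolve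
  have e_ps : Residue.part_size g.e.mem g.r = ps := by
    rw [← hc.reads.part_size]
    exact hps
  have e_bg : Residue.begin g.e.mem g.r = bg := by
    rw [← hc.reads.begin]
    exact hbg
  have sl_psz : s_10f25b.mem.readLE (g.e.reg .rsp - 192) 4 = Residue.part_size g.e.mem g.r := by
    rw [e_ps]
    u_resolve
    rw [toNat_ofNat32 ps (by omega)]
    exact Nat.mod_eq_of_lt (by omega)
  have sl_z : s_10f25b.mem.readLE (g.e.reg .rsp - 160) 4 =
      Residue.begin g.e.mem g.r + pcount * Residue.part_size g.e.mem g.r := by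
    rw [e_ps, e_bg]
    u_resolve
    rw [z_lea, BitVec.toNat_mul, toNat_ofNat32 bg (by omega), toNat_ofNat32 ps (by omega), Asan.part32_toNat,
      UInt64.toNat_ofNat']
    have e1 : pcount % 2 ^ 64 % 2 ^ 32 = pcount := by omega
    rw [e1]
    have e2 : ps * pcount = pcount * ps := Nat.mul_comm _ _
    rw [e2]
    have h1 : pcount * ps < 2 ^ 32 := by omega
    rw [Nat.mod_eq_of_lt h1]
    have h2 : bg + pcount * ps < 2 ^ 32 := by omega
    rw [Nat.mod_eq_of_lt h2]
    exact Nat.mod_eq_of_lt (by omega)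
  have e_rbx : s_10f25b.reg .rbx = UInt64.ofNat b := by
    rw [w_rbx]
    apply UInt64.toNat_inj.mp
    unfold Word.ofBV
    simp only [UInt64.toNat_ofBitVec, BitVec.zeroExtend, BitVec.toNat_setWidth, BitVec.toNat_ofNat, UInt64.toNat_ofNat']
    omega
  have e_cc : stb_vorbis.codebook_count s_10f25b.mem g.f = stb_vorbis.codebook_count v.mem g.f :=
    hc'.reads.codebook_count.trans hc.reads.codebook_count.symm
  refine ReachVia.done ⟨b, ⟨w_rip, hc', hch2, (w_kept .r14 rfl).trans b_r14, (w_kept .r13 rfl).trans hr13,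
    hpath' pass hpath, (w_kept .r15 rfl).trans hr15, sl_cs, hwi', hinter'⟩, hi, hp, sl_psz, sl_z, e_rbx, hblt, ?_⟩
  rw [e_cc]
  exact hbook




/-- Bit 15 of a 16-bit value (a `BitVec` fact, by `bv_decide`). -/
theorem bit15_bv (x : BitVec 16) : (x &&& 32768#16) = 0#16 ↔ x < 32768#16 := by
  bv_decide

/-- `test bx, 0x8000`: the sign of `b = residue_books[c][pass]`. -/
theorem bit15 (b : Nat) (hb : b < 65536) :
    (Word.part Width.w16 (UInt64.ofNat b) &&& 32768#16).toNat = 0 ↔ b < 32768 := by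
  have e : (Word.part Width.w16 (UInt64.ofNat b)).toNat = b := by
    unfold Word.part
    simp only [Width.bits, BitVec.toNat_setWidth, UInt64.toNat_toBitVec, UInt64.toNat_ofNat']
    omega
  have h := bit15_bv (Word.part Width.w16 (UInt64.ofNat b))
  rw [BitVec.lt_def, e] at h
  have e0 : (32768#16).toNat = 32768 := by decide
  rw [e0] at h
  rw [← h]
  constructor
  · intro h0
    apply BitVec.eq_of_toNat_eq
    rw [h0]
    rfl
  · intro h0
    rw [h0]
    rfl

/-- `add r13d, 1` on a small counter. -/
theorem incr32 (x : Nat) (hx : x + 1 < 2 ^ 32) :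
    Word.ofBV (Word.part Width.w32 (UInt64.ofNat x) + 1#32) = UInt64.ofNat (x + 1) := by
  apply UInt64.toNat_inj.mp
  rw [toNat_ofBV32, BitVec.toNat_add, Asan.part32_toNat, UInt64.toNat_ofNat', UInt64.toNat_ofNat']
  have e1 : (1#32).toNat = 1 := by decide
  rw [e1]
  omega

/-- `z' = part_size + z` on 32 bits, `z' & 1` and `z' sar 1`, when `z' < 2^31`. -/
theorem z_val2 (x y : BitVec 32) (z : Nat) (hz : x.toNat + y.toNat = z) (hlt : z < 2 ^ 31) :
    ((x + y) &&& 1#32).toNat = z % 2 ∧ ((x + y).sshiftRight 1).toNat = z / 2 := by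
  have e : (x + y).toNat = z := by
    rw [BitVec.toNat_add, hz]
    exact Nat.mod_eq_of_lt (by omega)
  refine ⟨?_, ?_⟩
  · rw [BitVec.toNat_and, e]
    exact Nat.and_one_is_mod z
  · have hm : (x + y).msb = false := by
      rw [BitVec.msb_eq_decide]
      simp only [decide_eq_false_iff_not, Nat.not_le]
      omega
    rw [BitVec.sshiftRight_eq_of_msb_false hm, BitVec.toNat_ushiftRight, e, Nat.shiftRight_eq_div_pow]

/-- **The sign test of `b` and the `b < 0` arm** (0x10f260 … 0x10f28b, the latch 0x10f19f / 0x10f1a3; C 2191, 2202–2204, 2183):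
bit 15 clear → the call arm at 0x10f141 with nothing changed; bit 15 set → `z += part_size`, CI again (`z + part_size ≤ 2·n`: fact
K), `++i, ++pcount`: the loop head. -/
theorem neg_arm {Lay : Layout} (hLay : Lay.hi = 0x1000000) {μ : Microarch} (hμ : UserX.MicroOK μ) {u₀ : State}
    (hcode : HasCodeNat Lay u₀ Vorbis.L.decode_residue.entry Vorbis.Code.code_decode_residue.nat Vorbis.L.decode_residue.size)
    {g : G} (hent : Entered u₀ g) (pass cs i pcount b : Nat) (v : State)
    (hat : AtB 0x10f260 u₀ g pass cs i pcount b v) :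
    ReachVia Lay μ WayInv v (fun v' => AtIn L.decode_residue.cut14 u₀ g pass cs (i + 1) (pcount + 1) v' ∨
      (b < 32768 ∧ AtB 0x10f141 u₀ g pass cs i pcount b v')) := by
  obtain ⟨hloop, hi, hp, hslpsz, hslz, hrbx, hblt, hbook⟩ := hat
  obtain ⟨hrip, hc, hch2, hr14, hr13, hpath, hr15, hslcs, hwi, hinter⟩ := hloop
  have he := hent.entry
  v_entry he
  have b_rsp := hc.rsp
  have b_rbp := hc.rbp
  have w_eq : Mem.EqOn Vorbis.L.textLo Vorbis.L.textHi u₀.mem v.mem := hc.code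
  have hdf : v.flags .df = false := (show abiInv _ from hc.inv).1
  have hmx : v.mxcsr &&& 0x1F80 = 0x1F80 := (show abiInv _ from hc.inv).2
  have hsse := Vorbis.sseOK_of_abiInv hc.inv
  obtain ⟨psz, hpsz⟩ : ∃ psz, Residue.part_size g.e.mem g.r = psz := ⟨_, rfl⟩
  obtain ⟨bgn, hbgn⟩ : ∃ bgn, Residue.begin g.e.mem g.r = bgn := ⟨_, rfl⟩
  rw [hpsz] at hslpsz
  rw [hpsz, hbgn] at hslz
  obtain ⟨hn4096, hprd8192⟩ := n_prd_le hent
  have hW := hc.w_pos hent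
  have hWlt := w_lt g
  have hres := hc.resAt hent
  have hK := Residue.factK_pos hres (n := g.n) (ch := g.ch) (pc := pcount) (by omega) (by
    have e := hc.prd
    rw [hpath.rtype2] at e
    rw [e]
    exact hp)
  rw [hc.reads.begin, hc.reads.part_size, hbgn, hpsz, hch2] at hK
  u_walk hcode [hμ.vendor] until [Vorbis.L.decode_residue.cut14, 0x10f141] span [Vorbis.L.textLo, Vorbis.L.textHi] side (v_side)
  · -- bit 15 clear: `b ≥ 0`, the call arm at 0x10f141
    have hb15 : b < 32768 := (bit15 b hblt).mp hbr_10f265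
    have hs : Mem.SameExcept (stackWins g) v.mem s_10f265.mem := by
      rw [w_mem]
      exact Mem.SameExcept.refl _ _
    have hun : ShadowUntouched v.mem s_10f265.mem := by
      rw [w_mem]
      exact Mem.EqOn.refl _ _ _
    obtain ⟨hc', hpath', hfill⟩ := common_stack hent hc hs hun ((w_kept .rbp rfl).trans b_rbp)
      ((w_kept .rsp rfl).trans b_rsp) w_eq (by v_inv)
    refine ReachVia.done (Or.inr ⟨hb15, ⟨w_rip, hc', hch2, (w_kept .r14 rfl).trans hr14, (w_kept .r13 rfl).trans hr13,
      hpath' pass hpath, (w_kept .r15 rfl).trans hr15, ?_, ?_, ?_⟩, hi, hp, ?_, ?_, (w_kept .rbx rfl).trans hrbx, hblt, ?_⟩)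
    · rw [w_mem]
      exact hslcs
    · rw [w_mem]
      exact hwi
    · rw [w_mem]
      exact hinter
    · rw [w_mem, hpsz]
      exact hslpsz
    · rw [w_mem, hpsz, hbgn]
      exact hslz
    · rw [w_mem]
      exact hbook
  · -- bit 15 set: `z += part_size`, the two ints, the latch
    obtain ⟨zc, zp⟩ := z_val2 (BitVec.ofNat 32 psz) (BitVec.ofNat 32 (bgn + pcount * psz)) (psz + (bgn + pcount * psz)) (by
      rw [toNat_ofNat32 psz (by omega), toNat_ofNat32 _ (by omega)]) (by omega)
    have hs : Mem.SameExcept (stackWins g) v.mem s_10f1a3.mem := by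
      unfold stackWins
      rw [w_mem]
      u_same
    have hun : ShadowUntouched v.mem s_10f1a3.mem := by v_untouched
    have rc : s_10f1a3.mem.readLE (g.e.reg .rsp - 104) 4 = (psz + (bgn + pcount * psz)) % 2 := by
      u_resolve
      rw [zc]
      exact Nat.mod_eq_of_lt (by omega)
    have rp : s_10f1a3.mem.readLE (g.e.reg .rsp - 88) 4 = (psz + (bgn + pcount * psz)) / 2 := by
      u_resolve
      rw [zp]
      exact Nat.mod_eq_of_lt (by omega)
    have sl : s_10f1a3.mem.readLE (g.e.reg .rsp - 224) 4 = cs := by u_resolve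
    obtain ⟨hc', hpath', hfill⟩ := common_stack hent hc hs hun ((w_kept .rbp rfl).trans b_rbp)
      ((w_kept .rsp rfl).trans b_rsp) w_eq (by v_inv)
    have hC : 0 < g.C := by
      have := hent.args.ch_le
      unfold G.C
      omega
    have hwi' : WInnerInv s_10f1a3.mem g.f g.r g.TB g.C g.PRD g.W g.rowsA pass cs i pcount := by
      apply hwi.frame (fun j h => h) ?_ hW
      intro j m hj hf hm
      have e : j = 0 := hj
      exact hfill j m (by omega) hm hf
    have hinter' := inter_of_z (z := psz + (bgn + pcount * psz)) hent hch2 (by omega) hn4096 rc rp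
    refine ReachVia.done (Or.inl ⟨w_rip, hc', hch2, (w_kept .r14 rfl).trans hr14, ?_, hpath' pass hpath, ?_, sl,
      hwi'.step hi hp, hinter'⟩)
    · rw [w_r13]
      exact incr32 i (by omega)
    · rw [w_r15]
      exact incr32 pcount (by omega)



end Vorbis.Spec.decode_residue_4a
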